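-- pv_equiv track=rewrite | github.com/jaratma/astro-nex | astronex/drawing/paarwabe.py | sparse_curve
-- ===== SOURCE A (Python) =====
-- from collections import deque
-- from itertools import izip
--
-- def sparse_curve(plan):
--     def diftuple(tuple):
--         d = tuple[1][0] - tuple[0][0]
--         if d < 0:
--             d += 360
--         return d <= 1
--     planque = deque(plan)
--     boolque = deque([diftuple(t) for t in izip(plan,plan[1:]+[plan[0]])])
--
--     if True in boolque:
--         while boolque[0] != True or boolque[-1] != False:
--             boolque.rotate(-1)
--             planque.rotate(-1)
--
--     jail = []; cell = set()
--     for low,btuple in izip(planque,boolque):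
--         cell.add((low))
--         if btuple is False:
--             jail.append(cell)
--             cell = set()
--     sortedjail = []
--     for cell in jail:
--         sortedjail.append(sorted(cell))
--     return sortedjail
-- ===== SOURCE B (Python) =====
-- def sparse_curve(plan):
--     def close(a, b):
--         d = b[0] - a[0]
--         if d < 0:
--             d += 360
--         return d <= 1
--
--     # Phase 1: split plan LINEARLY into maximal runs of close-linked points.
--     runs, run = [], []
--     for prev, cur in zip(plan, plan[1:]):
--         run.append(prev)
--         if not close(prev, cur):
--             runs.append(run)
--             run = []
--     if plan:
--         runs.append(run + [plan[-1]])
--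
--     # Phase 2: wraparound — if the last point links back to the first, the
--     # last and first runs are one cell; that cell comes last in the output.
--     if len(runs) > 1 and close(plan[-1], plan[0]):
--         cells = runs[1:-1] + [runs[-1] + runs[0]]
--     else:
--         cells = runs
--
--     # Phase 3: start the output at the first multi-point cell (the alignment
--     # the rotation in the original produces); leading singletons wrap to the end.
--     j = next((i for i, c in enumerate(cells) if len(c) > 1), 0)
--     return [sorted(set(c)) for c in cells[j:] + cells[:j]]
-- ===== Notes on version B (the rewrite author's own statement) =====
-- stated objective: alternative
-- what changed: A rotates two deques in lockstep until the sequence starts right after a gap and then segments the rotated stream; B never rotates or indexes circularly: it splits the plan linearly into runs in one zip pass, merges the last run with the first when the wrap edge is close, and rotates only the small list of cells so the first multi-point cell leads.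
import Mathlib
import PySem

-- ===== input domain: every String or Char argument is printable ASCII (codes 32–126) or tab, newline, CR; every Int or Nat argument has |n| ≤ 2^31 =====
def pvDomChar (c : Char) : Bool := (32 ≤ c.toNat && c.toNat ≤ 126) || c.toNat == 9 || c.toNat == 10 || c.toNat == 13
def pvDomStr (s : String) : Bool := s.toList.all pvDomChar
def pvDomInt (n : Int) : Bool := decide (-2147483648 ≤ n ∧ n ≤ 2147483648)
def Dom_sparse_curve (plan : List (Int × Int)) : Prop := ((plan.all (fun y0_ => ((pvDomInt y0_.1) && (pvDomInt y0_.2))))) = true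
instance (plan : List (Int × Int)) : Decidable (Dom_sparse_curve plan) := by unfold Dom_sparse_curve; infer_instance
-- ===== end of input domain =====

-- B replaces A's deque rotation and circular segmentation by a single linear split
-- into runs, a wraparound merge of the last run into the first, and a rotation of
-- the small cell list (objective: alternative algorithm of similar cost).
-- The proved equivalence is about return values; neither program mutates its argument.

-- ===== PORT A =====
-- diftuple: is the edge between two consecutive angular points "close" (gap ≤ 1 after wrap)?
def pvDiftuple (t : (Int × Int) × (Int × Int)) : Bool :=
  let d := t.2.1 - t.1.1
  let d := if d < 0 then d + 360 else d
  decide (d ≤ 1)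

-- [diftuple(t) for t in zip(plan, plan[1:] + [plan[0]])]; for nonempty plan
-- plan.take 1 = [plan[0]] (on empty plan Python raises IndexError; excluded by Pre_).
def pvEdges (plan : List (Int × Int)) : List Bool :=
  (plan.zip (plan.drop 1 ++ plan.take 1)).map pvDiftuple

-- deque.rotate(-1): move the first element to the back
def pvRot1 {α : Type} : List α → List α
  | [] => []
  | x :: xs => xs ++ [x]

-- the while loop 'while boolque[0] != True or boolque[-1] != False: rotate both'.
-- Python has no fuel; fuel = plan.length only makes the recursion total and is
-- never exhausted on inputs satisfying Pre_ (where the loop terminates).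
def pvRotLoop : Nat → List Bool → List (Int × Int) → List Bool × List (Int × Int)
  | 0, b, p => (b, p)
  | Nat.succ fuel, b, p =>
    if b.headD false = true ∧ b.getLastD true = false then (b, p)
    else pvRotLoop fuel (pvRot1 b) (pvRot1 p)

-- the 'for low,btuple in izip(planque,boolque)' segmentation loop
def pvSegA : List (Int × Int) → List Bool → PySem.Set (Int × Int) → List (PySem.Set (Int × Int)) → List (PySem.Set (Int × Int))
  | p :: ps, b :: bs, cell, jail =>
    let cell' := cell.add p
    if b = false then pvSegA ps bs PySem.Set.empty (jail ++ [cell'])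
    else pvSegA ps bs cell' jail
  | _, _, _, jail => jail

def sparse_curve (plan : List (Int × Int)) : List (List (Int × Int)) :=
  let boolque := pvEdges plan
  let s := if true ∈ boolque then pvRotLoop plan.length boolque plan else (boolque, plan)
  let jail := pvSegA s.2 s.1 PySem.Set.empty []
  -- sorted(cell): cells hold (Int × Int) tuples, compared lexicographically
  jail.map (fun c => PySem.List.sorted2 c Prod.fst Prod.snd)

-- ===== PORT B =====
-- phase-1 loop of Source B: 'for prev, cur in zip(plan, plan[1:]): run.append(prev);
-- if not close(prev, cur): runs.append(run); run = []'
def pvBRuns : List ((Int × Int) × (Int × Int)) → List (Int × Int) → List (List (Int × Int)) → List (List (Int × Int)) × List (Int × Int)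
  | [], run, runs => (runs, run)
  | (prev, cur) :: rest, run, runs =>
    let run' := run ++ [prev]
    if pvDiftuple (prev, cur) = false then pvBRuns rest [] (runs ++ [run'])
    else pvBRuns rest run' runs

def sparse_curve_alt (plan : List (Int × Int)) : List (List (Int × Int)) :=
  let pr := pvBRuns (plan.zip (plan.drop 1)) [] []
  -- 'if plan: runs.append(run + [plan[-1]])'
  let runs : List (List (Int × Int)) :=
    match plan.getLast? with
    | none => pr.1
    | some last => pr.1 ++ [pr.2 ++ [last]]
  -- 'if len(runs) > 1 and close(plan[-1], plan[0]): cells = runs[1:-1] + [runs[-1] + runs[0]]'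
  let cells :=
    if 1 < runs.length ∧ pvDiftuple (plan.getLastD (0, 0), plan.headD (0, 0)) = true then
      (runs.drop 1).dropLast ++ [runs.getLastD [] ++ runs.headD []]
    else runs
  -- 'j = next((i for i, c in enumerate(cells) if len(c) > 1), 0)'
  let j := (cells.findIdx? (fun c => decide (1 < c.length))).getD 0
  -- '[sorted(set(c)) for c in cells[j:] + cells[:j]]'
  (cells.drop j ++ cells.take j).map (fun c => PySem.List.sorted2 (PySem.Set.ofList c) Prod.fst Prod.snd)

-- ===== PRECONDITION & SPEC =====
-- Pre_ excludes exactly the inputs on which A does not return: the empty plan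
-- (plan[0] raises IndexError) and plans all of whose circular edges are "close"
-- (A's while loop — reached for every nonempty such plan — never terminates).
def Pre_sparse_curve (plan : List (Int × Int)) : Prop :=
  plan ≠ [] ∧ false ∈ pvEdges plan
instance (plan : List (Int × Int)) : Decidable (Pre_sparse_curve plan) := by
  unfold Pre_sparse_curve; infer_instance

def pvWitness_sparse_curve : (List (Int × Int)) := [(0, 0), (5, 0)]

def Spec_sparse_curve (plan : List (Int × Int)) (out : List (List (Int × Int))) : Prop := out = sparse_curve_alt plan
instance (plan : List (Int × Int)) (out : List (List (Int × Int))) : Decidable (Spec_sparse_curve plan out) := by unfold Spec_sparse_curve; infer_instance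

-- ===== CLAIM (what is proved, stated in full; the proofs are below) =====
def Claim_equal_sparse_curve : Prop := ∀ (plan : List (Int × Int)), Dom_sparse_curve plan → Pre_sparse_curve plan → Spec_sparse_curve plan (sparse_curve plan)

-- ===== LEMMAS AND PROOFS =====

-- proof-only normal form of both segmentation loops: runs of a (point, edge-after) list
def pvRuns {α : Type} : List (α × Bool) → List α → List (List α) → List (List α) × List α
  | [], cur, acc => (acc, cur)
  | (x, b) :: rest, cur, acc =>
    if b then pvRuns rest (cur ++ [x]) acc
    else pvRuns rest [] (acc ++ [cur ++ [x]])

def pvRotl {α : Type} (k : Nat) (l : List α) : List α := l.drop k ++ l.take k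

-- the stop / start condition of A's rotation loop, as a predicate on the index
def pvP (e : List Bool) (k : Nat) : Prop :=
  e.getD k false = true ∧ e.getD ((k + e.length - 1) % e.length) false = false

-- proof-only restatements of the phase-2/phase-3 tail of B
def pvSortCell (c : List (Int × Int)) : List (Int × Int) :=
  PySem.List.sorted2 (PySem.Set.ofList c) Prod.fst Prod.snd

def pvCellsOut (cells : List (List (Int × Int))) : List (List (Int × Int)) :=
  let j := (cells.findIdx? (fun c => decide (1 < c.length))).getD 0
  (cells.drop j ++ cells.take j).map pvSortCell

def pvWrapCells (runs : List (List (Int × Int))) (w : Bool) : List (List (Int × Int)) :=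
  if 1 < runs.length ∧ w = true then
    (runs.drop 1).dropLast ++ [runs.getLastD [] ++ runs.headD []]
  else runs

lemma pvRuns_acc {α : Type} (z : List (α × Bool)) :
    ∀ cur acc, pvRuns z cur acc = (acc ++ (pvRuns z cur []).1, (pvRuns z cur []).2) := by
  induction z with
  | nil => intro cur acc; simp [pvRuns]
  | cons x rest ih =>
    intro cur acc
    obtain ⟨x, b⟩ := x
    cases b with
    | true => simp only [pvRuns, reduceIte]; exact ih _ _
    | false =>
      simp only [pvRuns, reduceIte]
      rw [ih [] (acc ++ [cur ++ [x]]), ih [] ([] ++ [cur ++ [x]])]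
      simp

lemma pvRuns_append {α : Type} (z1 z2 : List (α × Bool)) :
    ∀ cur acc, pvRuns (z1 ++ z2) cur acc = pvRuns z2 (pvRuns z1 cur acc).2 (pvRuns z1 cur acc).1 := by
  induction z1 with
  | nil => intro cur acc; simp [pvRuns]
  | cons x rest ih =>
    intro cur acc
    obtain ⟨x, b⟩ := x
    cases b <;> simp [pvRuns, ih]

lemma pvRuns_shift {α : Type} (z : List (α × Bool)) :
    ∀ cur, pvRuns z cur [] =
      (match (pvRuns z [] []).1 with
        | [] => []
        | r :: rs => (cur ++ r) :: rs,
       match (pvRuns z [] []).1 with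
        | [] => cur ++ (pvRuns z [] []).2
        | _ :: _ => (pvRuns z [] []).2) := by
  induction z with
  | nil => intro cur; simp [pvRuns]
  | cons x rest ih =>
    intro cur
    obtain ⟨x, b⟩ := x
    cases b with
    | true =>
      simp only [pvRuns, reduceIte, List.nil_append]
      rw [ih (cur ++ [x]), ih [x]]
      cases hc : (pvRuns rest [] []).1 <;> simp
    | false =>
      simp only [pvRuns, reduceIte, List.nil_append]
      rw [pvRuns_acc rest [] [cur ++ [x]], pvRuns_acc rest [] [[x]]]
      simp

lemma pvRuns_snoc {α : Type} (z : List (α × Bool)) (x : α) (b : Bool) (cur : List α) (acc : List (List α)) :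
    pvRuns (z ++ [(x, b)]) cur acc =
      if b then ((pvRuns z cur acc).1, (pvRuns z cur acc).2 ++ [x])
      else ((pvRuns z cur acc).1 ++ [(pvRuns z cur acc).2 ++ [x]], []) := by
  rw [pvRuns_append]
  cases b <;> simp [pvRuns]

lemma pvRuns_allfalse {α : Type} (z : List (α × Bool)) (h : ∀ x ∈ z, x.2 = false) :
    pvRuns z [] [] = (z.map (fun x => [x.1]), []) := by
  induction z with
  | nil => simp [pvRuns]
  | cons x rest ih =>
    obtain ⟨x, b⟩ := x
    have hb : b = false := h (x, b) (by simp)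
    subst hb
    simp only [pvRuns, reduceIte, List.nil_append]
    rw [pvRuns_acc rest [] [[x]], ih (fun y hy => h y (by simp [hy]))]
    simp

lemma pvRuns_alltrue {α : Type} (z : List (α × Bool)) (h : ∀ x ∈ z, x.2 = true) :
    ∀ cur acc, pvRuns z cur acc = (acc, cur ++ z.map (fun x => x.1)) := by
  induction z with
  | nil => intro cur acc; simp [pvRuns]
  | cons x rest ih =>
    intro cur acc
    obtain ⟨x, b⟩ := x
    have hb : b = true := h (x, b) (by simp)
    subst hb
    simp only [pvRuns, reduceIte]
    rw [ih (fun y hy => h y (by simp [hy]))]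
    simp

lemma pvRuns_ne_nil {α : Type} (z : List (α × Bool)) :
    ∀ cur acc, (∀ r ∈ acc, r ≠ []) → ∀ r ∈ (pvRuns z cur acc).1, r ≠ [] := by
  induction z with
  | nil => intro cur acc hacc; simpa [pvRuns] using hacc
  | cons x rest ih =>
    intro cur acc hacc
    obtain ⟨x, b⟩ := x
    cases b with
    | true => simp only [pvRuns, reduceIte]; exact ih _ _ hacc
    | false =>
      simp only [pvRuns, reduceIte]
      refine ih _ _ ?_
      intro r hr
      rcases List.mem_append.mp hr with h | h
      · exact hacc r h
      · simp at h; simp [h]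

-- a list starting with a close edge has no closed runs, or a first run with ≥ 2 points
lemma pvRuns_firstTrue {α : Type} (x : α) (rest : List (α × Bool)) :
    (pvRuns ((x, true) :: rest) [] []).1 = [] ∨
      ∃ r rs, (pvRuns ((x, true) :: rest) [] []).1 = r :: rs ∧ 1 < r.length := by
  simp only [pvRuns, reduceIte, List.nil_append]
  rw [pvRuns_shift rest [x]]
  cases hc : (pvRuns rest [] []).1 with
  | nil => left; simp [hc]
  | cons r rs =>
    right
    refine ⟨[x] ++ r, rs, by simp [hc], ?_⟩
    have hr : r ≠ [] := pvRuns_ne_nil rest [] [] (by simp) r (by rw [hc]; simp)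
    have : 0 < r.length := List.length_pos_iff.mpr hr
    simp
    omega

-- A's segmentation loop computes the closed runs, as sets
lemma pvSeg_runs (p : List (Int × Int)) :
    ∀ (e : List Bool) (cur : List (Int × Int)) (jail : List (PySem.Set (Int × Int))),
    pvSegA p e (PySem.Set.ofList cur) jail
      = jail ++ ((pvRuns (p.zip e) cur []).1).map PySem.Set.ofList := by
  induction p with
  | nil => intro e cur jail; simp [pvSegA, pvRuns]
  | cons x ps ih =>
    intro e cur jail
    cases e with
    | nil => simp [pvSegA, pvRuns]
    | cons b bs =>
      have hadd : (PySem.Set.ofList cur).add x = PySem.Set.ofList (cur ++ [x]) :=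
        (PySem.Set.ofList_append_singleton cur x).symm
      cases b with
      | false =>
        simp only [pvSegA, reduceIte, hadd, List.zip_cons_cons, pvRuns, List.nil_append]
        have he : PySem.Set.empty = PySem.Set.ofList ([] : List (Int × Int)) := rfl
        rw [he, ih bs [] (jail ++ [PySem.Set.ofList (cur ++ [x])]),
          pvRuns_acc (ps.zip bs) [] [cur ++ [x]]]
        simp
      | true =>
        simp only [pvSegA, reduceIte, hadd, List.zip_cons_cons, pvRuns]
        exact ih bs (cur ++ [x]) jail

-- B's phase-1 loop is pvRuns over (point, edge) pairs
lemma pvBRuns_eq (pairs : List ((Int × Int) × (Int × Int))) :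
    ∀ run runs, pvBRuns pairs run runs
      = pvRuns (pairs.map (fun pc => (pc.1, pvDiftuple pc))) run runs := by
  induction pairs with
  | nil => intro run runs; simp [pvBRuns, pvRuns]
  | cons pc rest ih =>
    intro run runs
    obtain ⟨prev, cur⟩ := pc
    cases hd : pvDiftuple (prev, cur) <;>
      simp [pvBRuns, pvRuns, hd, ih]

-- the pairs B zips are the first n-1 entries of plan zipped with its edge list
lemma pvPairs_eq (plan : List (Int × Int)) :
    (plan.zip (plan.drop 1)).map (fun pc => (pc.1, pvDiftuple pc))
      = (plan.zip (pvEdges plan)).take (plan.length - 1) := by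
  apply List.ext_getElem
  · simp [pvEdges]
  · intro i h1 h2
    have hi : i < plan.length - 1 := by simp at h1; omega
    have hip : i < plan.length := by omega
    have hd1 : i < (plan.drop 1).length := by simp; omega
    have hdrop : (plan.drop 1)[i]'hd1 = plan[1 + i]'(by omega) := List.getElem_drop ..
    have happ : (plan.drop 1 ++ plan.take 1)[i]'(by simp; omega) = plan[1 + i]'(by omega) := by
      rw [List.getElem_append_left hd1]
      exact hdrop
    simp only [List.getElem_map, List.getElem_take, List.getElem_zip, pvEdges]
    rw [happ, hdrop]

lemma pvLen_edges (plan : List (Int × Int)) : (pvEdges plan).length = plan.length := by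
  simp [pvEdges]; omega

-- the wrap edge is diftuple(plan[-1], plan[0])
lemma pvELast (plan : List (Int × Int)) (hne : plan ≠ []) :
    (pvEdges plan).getD (plan.length - 1) false
      = pvDiftuple (plan.getLastD (0, 0), plan.headD (0, 0)) := by
  have hn : 0 < plan.length := List.length_pos_iff.mpr hne
  have h1 : plan.length - 1 < (pvEdges plan).length := by rw [pvLen_edges]; omega
  rw [List.getD_eq_getElem _ _ h1]
  simp only [pvEdges, List.getElem_map, List.getElem_zip]
  have hright : (plan.drop 1 ++ plan.take 1)[plan.length - 1]'(by simp; omega)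
      = plan[0]'(by omega) := by
    rw [List.getElem_append_right (by simp)]
    have hz : plan.length - 1 - (plan.drop 1).length = 0 := by simp
    simp only [List.getElem_take, hz]
  have hlast : plan.getLastD (0, 0) = plan[plan.length - 1]'(by omega) := by
    rw [List.getLastD_eq_getLast?, List.getLast?_eq_getElem?, List.getElem?_eq_getElem (by omega)]
    rfl
  have hhead : plan.headD (0, 0) = plan[0]'(by omega) := by
    cases plan with
    | nil => simp at hn
    | cons a l => rfl
  rw [hlast, hhead, hright]

-- the elements of a contiguous region of plan.zip(edges) carry the region's edge value
lemma pvTakeSnd (plan : List (Int × Int)) (a b : Nat) (v : Bool)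
    (h : ∀ i, a ≤ i → i < b → (pvEdges plan).getD i false = v) :
    ∀ x ∈ ((plan.zip (pvEdges plan)).take b).drop a, x.2 = v := by
  intro x hx
  obtain ⟨j, hj, hxe⟩ := List.mem_iff_getElem.mp hx
  have hzlen : (plan.zip (pvEdges plan)).length = plan.length := by
    simp [pvLen_edges]
  have hj' : j < min b plan.length - a := by
    simpa [List.length_drop, List.length_take, hzlen] using hj
  have hjb : a + j < b := by omega
  have hjz : a + j < (plan.zip (pvEdges plan)).length := by omega
  have hxval : x = (plan.zip (pvEdges plan))[a + j]'hjz := by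
    rw [← hxe, List.getElem_drop, List.getElem_take]
  have hje : a + j < (pvEdges plan).length := by
    rw [pvLen_edges]
    omega
  rw [hxval, List.getElem_zip]
  have he : (pvEdges plan)[a + j]'hje = (pvEdges plan).getD (a + j) false :=
    (List.getD_eq_getElem _ _ hje).symm
  simp only [he]
  exact h (a + j) (by omega) hjb

-- ---- A's rotation loop ----

lemma pvRot1_rotl {α : Type} (l : List α) (j : Nat) (hj : j < l.length) :
    pvRot1 (pvRotl j l) = pvRotl (j + 1) l := by
  have hdrop : l.drop j = l[j] :: l.drop (j + 1) := List.drop_eq_getElem_cons hj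
  have htake : l.take (j + 1) = l.take j ++ [l[j]] := by
    rw [List.take_succ]
    simp [List.getElem?_eq_getElem hj]
  simp only [pvRotl, hdrop, htake, List.cons_append, pvRot1, List.append_assoc]

lemma pvHead_rotl (l : List Bool) (j : Nat) (hj : j < l.length) :
    (pvRotl j l).headD false = l.getD j false := by
  have hdrop : l.drop j = l[j] :: l.drop (j + 1) := List.drop_eq_getElem_cons hj
  rw [pvRotl, hdrop, List.getD_eq_getElem l false hj]
  rfl

lemma pvGetLastD_eq_getD (l : List Bool) (h : 0 < l.length) (d : Bool) :
    l.getLastD d = l.getD (l.length - 1) false := by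
  rw [List.getLastD_eq_getLast?, List.getLast?_eq_getElem?,
    List.getElem?_eq_getElem (by omega), List.getD_eq_getElem l false (by omega)]
  rfl

lemma pvLast_rotl (l : List Bool) (j : Nat) (hj : j < l.length) :
    (pvRotl j l).getLastD true = l.getD ((j + l.length - 1) % l.length) false := by
  rcases Nat.eq_zero_or_pos j with hj0 | hjpos
  · subst hj0
    have h1 : (0 + l.length - 1) % l.length = l.length - 1 := by
      have : 0 + l.length - 1 = l.length - 1 := by omega
      rw [this, Nat.mod_eq_of_lt (by omega)]
    have h2 : pvRotl 0 l = l := by simp [pvRotl]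
    rw [h2, h1, pvGetLastD_eq_getD l (by omega)]
  · have h1 : (j + l.length - 1) % l.length = j - 1 := by
      rw [Nat.mod_eq_sub_mod (by omega)]
      have h : j + l.length - 1 - l.length = j - 1 := by omega
      rw [h, Nat.mod_eq_of_lt (by omega)]
    have htk : (l.take j) ≠ [] := by
      intro hcon
      have := congrArg List.length hcon
      simp only [List.length_take, List.length_nil] at this
      omega
    have hlen : (l.take j).length = j := by simp; omega
    rw [pvRotl, h1, List.getLastD_eq_getLast?, List.getLast?_append_of_ne_nil _ htk,
      List.getLast?_eq_getElem?, hlen, List.getElem?_eq_getElem (by rw [hlen]; omega)]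
    rw [List.getElem_take, List.getD_eq_getElem l false (by omega)]
    rfl

lemma pvRotLoop_eq (e : List Bool) (p : List (Int × Int)) (k : Nat)
    (hle : e.length = p.length) (hk : k < p.length) (hP : pvP e k)
    (hmin : ∀ i, i < k → ¬ pvP e i) :
    ∀ fuel j, j ≤ k → k - j < fuel →
      pvRotLoop fuel (pvRotl j e) (pvRotl j p) = (pvRotl k e, pvRotl k p) := by
  intro fuel
  induction fuel with
  | zero => intro j hj hfuel; omega
  | succ fuel ih =>
    intro j hj hfuel
    have hje : j < e.length := by omega
    have hjp : j < p.length := by omega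
    simp only [pvRotLoop]
    rw [pvHead_rotl e j hje, pvLast_rotl e j hje]
    by_cases hjk : j = k
    · subst hjk
      rw [if_pos ⟨hP.1, hP.2⟩]
    · have hnP : ¬ pvP e j := hmin j (by omega)
      rw [if_neg (by simpa [pvP] using hnP)]
      rw [pvRot1_rotl e j hje, pvRot1_rotl p j hjp]
      exact ih (j + 1) (by omega) (by omega)

lemma pvExistsP (e : List Bool) (ht : true ∈ e) (hf : false ∈ e) :
    ∃ k, k < e.length ∧ pvP e k := by
  obtain ⟨it, hit, hite⟩ := List.mem_iff_getElem.mp ht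
  obtain ⟨ifx, hifx, hifxe⟩ := List.mem_iff_getElem.mp hf
  have hn : 0 < e.length := by omega
  have hQex : ∃ m, e.getD ((ifx + 1 + m) % e.length) false = true := by
    refine ⟨it + e.length - (ifx + 1), ?_⟩
    have h : ifx + 1 + (it + e.length - (ifx + 1)) = it + e.length := by omega
    rw [h, Nat.add_mod_right, Nat.mod_eq_of_lt hit, List.getD_eq_getElem _ _ hit, hite]
  set m := Nat.find hQex with hm
  refine ⟨(ifx + 1 + m) % e.length, Nat.mod_lt _ hn, Nat.find_spec hQex, ?_⟩
  have hstep : ((ifx + 1 + m) % e.length + e.length - 1) % e.length = (ifx + m) % e.length := by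
    have h0 : (ifx + 1 + m) % e.length + e.length - 1 = (ifx + 1 + m) % e.length + (e.length - 1) := by omega
    rw [h0, Nat.mod_add_mod, show ifx + 1 + m + (e.length - 1) = ifx + m + e.length by omega,
      Nat.add_mod_right]
  rw [hstep]
  rcases Nat.eq_zero_or_pos m with hm0 | hmpos
  · rw [hm0, Nat.add_zero, Nat.mod_eq_of_lt hifx, List.getD_eq_getElem _ _ hifx, hifxe]
  · have hnot := Nat.find_min hQex (show m - 1 < m by omega)
    have h : ifx + 1 + (m - 1) = ifx + m := by omega
    rw [h] at hnot
    exact Bool.not_eq_true _ ▸ (by simpa using hnot)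

-- ---- the minimal stop index forces an all-false prefix (after a true-block at 0) ----

lemma pvP0 (e : List Bool) (h0 : 0 < e.length)
    (hlast : e.getD (e.length - 1) false = false) (hnp : ¬ pvP e 0) :
    e.getD 0 false = false := by
  unfold pvP at hnp
  have h1 : (0 + e.length - 1) % e.length = e.length - 1 := by
    have h : 0 + e.length - 1 = e.length - 1 := by omega
    rw [h, Nat.mod_eq_of_lt (by omega)]
  rw [h1, hlast] at hnp
  cases hv : e.getD 0 false
  · rfl
  · exact absurd ⟨hv, rfl⟩ hnp

lemma pvSegFalse (e : List Bool) (k t : Nat) (hk : k ≤ e.length)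
    (ht : e.getD t false = false) (hmin : ∀ i, i < k → ¬ pvP e i) :
    ∀ i, t ≤ i → i < k → e.getD i false = false := by
  intro i
  induction i with
  | zero =>
    intro h0 _
    have : t = 0 := by omega
    exact this ▸ ht
  | succ i ih =>
    intro hti hik
    rcases Nat.lt_or_ge i t with hlt | hge
    · have hteq : t = i + 1 := by omega
      exact hteq ▸ ht
    · have hif : e.getD i false = false := ih hge (by omega)
      have hnp := hmin (i + 1) hik
      unfold pvP at hnp
      have hmod : (i + 1 + e.length - 1) % e.length = i := by
        have h : i + 1 + e.length - 1 = i + e.length := by omega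
        rw [h, Nat.add_mod_right, Nat.mod_eq_of_lt (by omega)]
      rw [hmod, hif] at hnp
      cases hv : e.getD (i + 1) false
      · rfl
      · exact absurd ⟨hv, rfl⟩ hnp

-- ---- phase 3 of B ----

lemma pvFindIdx_app (u : List (List (Int × Int))) (vh : List (Int × Int)) (vt : List (List (Int × Int)))
    (hu : ∀ r ∈ u, r.length = 1) (hv : 1 < vh.length) :
    ((u ++ vh :: vt).findIdx? (fun c => decide (1 < c.length))) = some u.length := by
  induction u with
  | nil => simp [List.findIdx?_cons, hv]
  | cons r us ih =>
    have hr : r.length = 1 := hu r (by simp)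
    simp only [List.cons_append, List.findIdx?_cons, hr]
    rw [if_neg (by simp), ih (fun s hs => hu s (by simp [hs]))]
    simp

lemma pvCellsOut_app (u : List (List (Int × Int))) (vh : List (Int × Int)) (vt : List (List (Int × Int)))
    (hu : ∀ r ∈ u, r.length = 1) (hv : 1 < vh.length) :
    pvCellsOut (u ++ vh :: vt) = ((vh :: vt) ++ u).map pvSortCell := by
  unfold pvCellsOut
  rw [pvFindIdx_app u vh vt hu hv]
  simp only [Option.getD_some]
  rw [List.drop_left, List.take_left]

lemma pvCellsOut_none (u : List (List (Int × Int))) (hu : ∀ r ∈ u, r.length = 1) :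
    pvCellsOut u = u.map pvSortCell := by
  unfold pvCellsOut
  have : u.findIdx? (fun c => decide (1 < c.length)) = none := by
    rw [List.findIdx?_eq_none_iff]
    intro r hr
    simp [hu r hr]
  rw [this]
  simp

lemma pvMapSort (L : List (List (Int × Int))) :
    (L.map PySem.Set.ofList).map (fun c => PySem.List.sorted2 c Prod.fst Prod.snd)
      = L.map pvSortCell := by
  rw [List.map_map]
  rfl

-- ---- characterizations of the two ports ----

lemma pvZip_rotl (p : List (Int × Int)) (e : List Bool) (k : Nat)
    (hl : e.length = p.length) :
    (pvRotl k p).zip (pvRotl k e) = pvRotl k (p.zip e) := by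
  simp only [pvRotl, List.zip_eq_zipWith]
  rw [List.zipWith_append (by simp [hl]), List.drop_zipWith, List.take_zipWith]

lemma pvAlt_eq (plan : List (Int × Int)) (hne : plan ≠ []) :
    sparse_curve_alt plan = pvCellsOut (pvWrapCells
      ((pvRuns ((plan.zip (pvEdges plan)).take (plan.length - 1)) [] []).1
        ++ [(pvRuns ((plan.zip (pvEdges plan)).take (plan.length - 1)) [] []).2 ++ [plan.getLast hne]])
      ((pvEdges plan).getD (plan.length - 1) false)) := by
  have hgl : plan.getLast? = some (plan.getLast hne) :=
    List.getLast?_eq_getLast_of_ne_nil hne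
  simp only [sparse_curve_alt, pvBRuns_eq, pvPairs_eq, hgl, ← pvELast plan hne,
    pvCellsOut, pvWrapCells, pvSortCell]
  rfl

lemma pvA_eq (plan : List (Int × Int)) (hne : plan ≠ [])
    (htrue : true ∈ pvEdges plan) (hfalse : false ∈ pvEdges plan) :
    ∃ k, k < plan.length ∧ pvP (pvEdges plan) k ∧ (∀ i, i < k → ¬ pvP (pvEdges plan) i) ∧
      sparse_curve plan
        = ((pvRuns (pvRotl k (plan.zip (pvEdges plan))) [] []).1).map pvSortCell := by
  haveI : DecidablePred (pvP (pvEdges plan)) := fun i => by unfold pvP; infer_instance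
  have hlen := pvLen_edges plan
  have hn : 0 < plan.length := List.length_pos_iff.mpr hne
  obtain ⟨k0, hk0, hPk0⟩ := pvExistsP _ htrue hfalse
  have hex : ∃ k, pvP (pvEdges plan) k := ⟨k0, hPk0⟩
  have hk : Nat.find hex < plan.length := by
    have := Nat.find_min' hex hPk0
    omega
  refine ⟨Nat.find hex, hk, Nat.find_spec hex, fun i hi => Nat.find_min hex hi, ?_⟩
  have hrot := pvRotLoop_eq (pvEdges plan) plan (Nat.find hex) hlen hk (Nat.find_spec hex)
    (fun i hi => Nat.find_min hex hi) plan.length 0 (by omega) (by omega)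
  have h0e : pvRotl 0 (pvEdges plan) = pvEdges plan := by simp [pvRotl]
  have h0p : pvRotl 0 plan = plan := by simp [pvRotl]
  rw [h0e, h0p] at hrot
  unfold sparse_curve
  simp only [if_pos htrue, hrot]
  rw [show PySem.Set.empty = PySem.Set.ofList ([] : List (Int × Int)) from rfl,
    pvSeg_runs, pvZip_rotl plan (pvEdges plan) (Nat.find hex) hlen]
  simp only [List.nil_append]
  exact pvMapSort _

-- ---- the three cases of the equivalence ----

lemma pvZsnoc (plan : List (Int × Int)) (hne : plan ≠ []) :
    plan.zip (pvEdges plan)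
      = (plan.zip (pvEdges plan)).take (plan.length - 1)
        ++ [(plan.getLast hne, (pvEdges plan).getD (plan.length - 1) false)] := by
  have hn : 0 < plan.length := List.length_pos_iff.mpr hne
  have hlen := pvLen_edges plan
  have hzlen : (plan.zip (pvEdges plan)).length = plan.length := by simp [hlen]
  have hzne : plan.zip (pvEdges plan) ≠ [] := by
    intro h
    rw [h] at hzlen
    simp at hzlen
    omega
  have h1 := (List.dropLast_append_getLast hzne).symm
  rw [List.dropLast_eq_take, hzlen] at h1
  have h2 : (plan.zip (pvEdges plan)).getLast hzne
      = (plan.getLast hne, (pvEdges plan).getD (plan.length - 1) false) := by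
    rw [List.getLast_eq_getElem, List.getElem_zip]
    rw [List.getLast_eq_getElem hne, List.getD_eq_getElem _ _ (by omega)]
    congr 1 <;> simp [hlen, Nat.min_self]
  rw [h2] at h1
  exact h1

-- pvRuns over the whole circle, split at the wrap entry
lemma pvRuns_z_snoc (plan : List (Int × Int)) (hne : plan ≠ []) :
    pvRuns (plan.zip (pvEdges plan)) [] [] =
      (if (pvEdges plan).getD (plan.length - 1) false then
        ((pvRuns ((plan.zip (pvEdges plan)).take (plan.length - 1)) [] []).1,
         (pvRuns ((plan.zip (pvEdges plan)).take (plan.length - 1)) [] []).2 ++ [plan.getLast hne])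
      else
        ((pvRuns ((plan.zip (pvEdges plan)).take (plan.length - 1)) [] []).1
           ++ [(pvRuns ((plan.zip (pvEdges plan)).take (plan.length - 1)) [] []).2 ++ [plan.getLast hne]],
         ([] : List (Int × Int)))) := by
  conv_lhs => rw [pvZsnoc plan hne]
  rw [pvRuns_snoc]

lemma pvCaseNoTrue (plan : List (Int × Int)) (hne : plan ≠ [])
    (htrue : true ∉ pvEdges plan) :
    sparse_curve plan = sparse_curve_alt plan := by
  have hn : 0 < plan.length := List.length_pos_iff.mpr hne
  have hlen := pvLen_edges plan
  have hallf : ∀ x ∈ pvEdges plan, x = false := by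
    intro x hx
    cases x
    · rfl
    · exact absurd hx htrue
  have hzallf : ∀ x ∈ plan.zip (pvEdges plan), x.2 = false := by
    intro x hx
    exact hallf x.2 (List.of_mem_zip hx).2
  have hlin : pvRuns (plan.zip (pvEdges plan)) [] []
      = ((plan.zip (pvEdges plan)).map (fun x => [x.1]), []) := pvRuns_allfalse _ hzallf
  have helast : (pvEdges plan).getD (plan.length - 1) false = false := by
    have h1 : plan.length - 1 < (pvEdges plan).length := by omega
    rw [List.getD_eq_getElem _ _ h1]
    exact hallf _ (List.getElem_mem h1)
  -- A
  have hA : sparse_curve plan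
      = (((plan.zip (pvEdges plan)).map (fun x => [x.1])).map pvSortCell) := by
    unfold sparse_curve
    simp only [if_neg htrue]
    rw [show PySem.Set.empty = PySem.Set.ofList ([] : List (Int × Int)) from rfl,
      pvSeg_runs, hlin]
    simp only [List.nil_append]
    exact pvMapSort _
  -- B
  rw [pvAlt_eq plan hne, helast]
  have hz := pvRuns_z_snoc plan hne
  rw [helast] at hz
  simp only [Bool.false_eq_true, if_false] at hz
  have hruns : (pvRuns ((plan.zip (pvEdges plan)).take (plan.length - 1)) [] []).1
      ++ [(pvRuns ((plan.zip (pvEdges plan)).take (plan.length - 1)) [] []).2 ++ [plan.getLast hne]]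
      = (plan.zip (pvEdges plan)).map (fun x => [x.1]) := by
    have h1 := hz.symm.trans hlin
    exact (Prod.ext_iff.mp h1).1
  rw [hruns]
  unfold pvWrapCells
  rw [if_neg (by simp)]
  rw [pvCellsOut_none _ (by intro r hr; obtain ⟨x, _, rfl⟩ := List.mem_map.mp hr; rfl)]
  exact hA

lemma pvCaseFalseLast (plan : List (Int × Int)) (hne : plan ≠ [])
    (htrue : true ∈ pvEdges plan)
    (helast : (pvEdges plan).getD (plan.length - 1) false = false) :
    sparse_curve plan = sparse_curve_alt plan := by
  have hn : 0 < plan.length := List.length_pos_iff.mpr hne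
  have hlen := pvLen_edges plan
  have hzlen : (plan.zip (pvEdges plan)).length = plan.length := by simp [hlen]
  have hfalse : false ∈ pvEdges plan := by
    have h1 : plan.length - 1 < (pvEdges plan).length := by omega
    have h2 := List.getD_eq_getElem (pvEdges plan) false h1
    rw [h2] at helast
    exact helast ▸ List.getElem_mem h1
  obtain ⟨k, hk, hPk, hmin, hA⟩ := pvA_eq plan hne htrue hfalse
  -- every edge before the stop index is a gap
  have hpref : ∀ i, i < k → (pvEdges plan).getD i false = false := by
    intro i hik
    have h0 : (pvEdges plan).getD 0 false = false :=
      pvP0 _ (by omega) (by rw [hlen]; exact helast) (hmin 0 (by omega))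
    exact pvSegFalse _ k 0 (by omega) h0 hmin i (by omega) hik
  have hz1f : ∀ x ∈ ((plan.zip (pvEdges plan)).take k).drop 0, x.2 = false :=
    pvTakeSnd plan 0 k false (fun i _ hik => hpref i hik)
  have hc1 : pvRuns ((plan.zip (pvEdges plan)).take k) [] []
      = (((plan.zip (pvEdges plan)).take k).map (fun x => [x.1]), []) :=
    pvRuns_allfalse _ (by simpa using hz1f)
  -- the suffix starts with a close edge
  have hkz : k < (plan.zip (pvEdges plan)).length := by omega
  have hket : (pvEdges plan)[k]'(by omega) = true := by
    have h := hPk.1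
    rwa [List.getD_eq_getElem _ _ (show k < (pvEdges plan).length by omega)] at h
  have hz2cons : (plan.zip (pvEdges plan)).drop k
      = ((plan[k]'(by omega), true)) :: (plan.zip (pvEdges plan)).drop (k + 1) := by
    rw [List.drop_eq_getElem_cons hkz]
    congr 1
    simp [List.getElem_zip, hket]
  -- the suffix ends with the wrap gap, so its open run is empty and it has a closed run
  have hz2ne : (plan.zip (pvEdges plan)).drop k ≠ [] := by rw [hz2cons]; simp
  have hz2last : ((plan.zip (pvEdges plan)).drop k).getLast hz2ne = (plan.getLast hne, false) := by
    rw [List.getLast_eq_getElem, List.getElem_drop]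
    have hig : k + (((plan.zip (pvEdges plan)).drop k).length - 1) = plan.length - 1 := by
      simp [hzlen]
      omega
    simp only [hig, List.getElem_zip, Prod.mk.injEq]
    refine ⟨?_, ?_⟩
    · rw [List.getLast_eq_getElem hne]
    · rw [List.getD_eq_getElem _ _ (show plan.length - 1 < (pvEdges plan).length by omega)] at helast
      exact helast
  have hz2runs : pvRuns ((plan.zip (pvEdges plan)).drop k) [] []
      = ((pvRuns (((plan.zip (pvEdges plan)).drop k).dropLast) [] []).1
          ++ [(pvRuns (((plan.zip (pvEdges plan)).drop k).dropLast) [] []).2 ++ [plan.getLast hne]],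
         []) := by
    conv_lhs => rw [← List.dropLast_append_getLast hz2ne, hz2last]
    rw [pvRuns_snoc]
    simp
  have ho2 : (pvRuns ((plan.zip (pvEdges plan)).drop k) [] []).2 = [] := by rw [hz2runs]
  have hc2ne : (pvRuns ((plan.zip (pvEdges plan)).drop k) [] []).1 ≠ [] := by rw [hz2runs]; simp
  have hft := pvRuns_firstTrue (plan[k]'(by omega)) ((plan.zip (pvEdges plan)).drop (k + 1))
  rw [← hz2cons] at hft
  rcases hft with hem | ⟨ch, ct, hc2, hch⟩
  · exact absurd hem hc2ne
  -- A's cells: the suffix runs, then the prefix singletons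
  have hAcells : (pvRuns (pvRotl k (plan.zip (pvEdges plan))) [] []).1
      = (pvRuns ((plan.zip (pvEdges plan)).drop k) [] []).1
        ++ ((plan.zip (pvEdges plan)).take k).map (fun x => [x.1]) := by
    show (pvRuns ((plan.zip (pvEdges plan)).drop k ++ (plan.zip (pvEdges plan)).take k) [] []).1 = _
    rw [pvRuns_append, ho2, pvRuns_acc, hc1]
  -- B's cells: the prefix singletons, then the suffix runs
  have hlin : pvRuns (plan.zip (pvEdges plan)) [] []
      = (((plan.zip (pvEdges plan)).take k).map (fun x => [x.1])
          ++ (pvRuns ((plan.zip (pvEdges plan)).drop k) [] []).1,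
         (pvRuns ((plan.zip (pvEdges plan)).drop k) [] []).2) := by
    conv_lhs => rw [← List.take_append_drop k (plan.zip (pvEdges plan))]
    rw [pvRuns_append, hc1, pvRuns_acc]
  have hz := pvRuns_z_snoc plan hne
  rw [helast] at hz
  simp only [Bool.false_eq_true, if_false] at hz
  have hruns : (pvRuns ((plan.zip (pvEdges plan)).take (plan.length - 1)) [] []).1
      ++ [(pvRuns ((plan.zip (pvEdges plan)).take (plan.length - 1)) [] []).2 ++ [plan.getLast hne]]
      = ((plan.zip (pvEdges plan)).take k).map (fun x => [x.1])
        ++ (pvRuns ((plan.zip (pvEdges plan)).drop k) [] []).1 :=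
    (Prod.ext_iff.mp (hz.symm.trans hlin)).1
  rw [hA, hAcells, hc2, pvAlt_eq plan hne, hruns, hc2, helast]
  unfold pvWrapCells
  rw [if_neg (by simp)]
  rw [pvCellsOut_app _ ch ct
    (by intro r hr; obtain ⟨x, _, rfl⟩ := List.mem_map.mp hr; rfl) hch]

lemma pvCaseTrueLast (plan : List (Int × Int)) (hne : plan ≠ [])
    (htrue : true ∈ pvEdges plan) (hfalse : false ∈ pvEdges plan)
    (helast : (pvEdges plan).getD (plan.length - 1) false = true) :
    sparse_curve plan = sparse_curve_alt plan := by
  have hn : 0 < plan.length := List.length_pos_iff.mpr hne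
  have hlen := pvLen_edges plan
  have hzlen : (plan.zip (pvEdges plan)).length = plan.length := by simp [hlen]
  obtain ⟨k, hk, hPk, hmin, hA⟩ := pvA_eq plan hne htrue hfalse
  -- the stop index is positive (the wrap edge is close)
  have hk1 : 1 ≤ k := by
    by_contra hcon
    have hk0 : k = 0 := by omega
    have h := hPk.2
    rw [hk0] at h
    have hidx : (0 + (pvEdges plan).length - 1) % (pvEdges plan).length = plan.length - 1 := by
      rw [hlen]
      have he : 0 + plan.length - 1 = plan.length - 1 := by omega
      rw [he, Nat.mod_eq_of_lt (by omega)]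
    rw [hidx, helast] at h
    simp at h
  have hkm1 : (pvEdges plan).getD (k - 1) false = false := by
    have h := hPk.2
    have hidx : (k + (pvEdges plan).length - 1) % (pvEdges plan).length = k - 1 := by
      rw [hlen]
      have he : k + plan.length - 1 = (k - 1) + plan.length := by omega
      rw [he, Nat.add_mod_right, Nat.mod_eq_of_lt (by omega)]
    rwa [hidx] at h
  -- the first gap index t before k: close edges before it, gaps from it to k
  have htex : ∃ i, i < k ∧ (pvEdges plan).getD i false = false := ⟨k - 1, by omega, hkm1⟩
  obtain ⟨t, htk, htf, htmin⟩ :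
      ∃ t, t < k ∧ (pvEdges plan).getD t false = false ∧
        ∀ i, i < t → (pvEdges plan).getD i false = true := by
    refine ⟨Nat.find htex, (Nat.find_spec htex).1, (Nat.find_spec htex).2, ?_⟩
    intro i hit
    cases hb : (pvEdges plan).getD i false with
    | false => exact absurd ⟨by have := (Nat.find_spec htex).1; omega, hb⟩ (Nat.find_min htex hit)
    | true => rfl
  have hseg : ∀ i, t ≤ i → i < k → (pvEdges plan).getD i false = false :=
    pvSegFalse _ k t (by omega) htf hmin
  -- split the k-prefix at t
  have hz1a : ∀ x ∈ (plan.zip (pvEdges plan)).take t, x.2 = true := by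
    have h := pvTakeSnd plan 0 t true (fun i _ hit => htmin i hit)
    simpa using h
  have hz1b : ∀ x ∈ ((plan.zip (pvEdges plan)).take k).drop t, x.2 = false :=
    pvTakeSnd plan t k false hseg
  have hz1split : (plan.zip (pvEdges plan)).take k
      = (plan.zip (pvEdges plan)).take t ++ ((plan.zip (pvEdges plan)).take k).drop t := by
    conv_lhs => rw [← List.take_append_drop t ((plan.zip (pvEdges plan)).take k)]
    congr 1
    rw [List.take_take, Nat.min_eq_left (by omega)]
  have hz1blen : (((plan.zip (pvEdges plan)).take k).drop t).length = k - t := by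
    simp [hzlen]
    omega
  cases hzb : ((plan.zip (pvEdges plan)).take k).drop t with
  | nil => rw [hzb] at hz1blen; simp at hz1blen; omega
  | cons hb tb =>
  have hfb : pvRuns (hb :: tb) [] [] = ((hb :: tb).map (fun x => [x.1]), []) :=
    pvRuns_allfalse _ (by rw [← hzb]; exact hz1b)
  -- the k-prefix runs: one leading run, then singletons
  have hc1 : pvRuns ((plan.zip (pvEdges plan)).take k) [] []
      = ((((plan.zip (pvEdges plan)).take t).map (fun x => x.1) ++ [hb.1])
          :: tb.map (fun x => [x.1]), []) := by
    rw [hz1split, pvRuns_append, pvRuns_alltrue _ hz1a]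
    simp only [List.nil_append]
    rw [hzb, pvRuns_shift, hfb]
    simp
  -- the k-prefix runs fed with the suffix's open run: the wrap cell leads
  have hshift : pvRuns ((plan.zip (pvEdges plan)).take k)
      ((pvRuns ((plan.zip (pvEdges plan)).drop k) [] []).2) []
      = (((pvRuns ((plan.zip (pvEdges plan)).drop k) [] []).2
            ++ (((plan.zip (pvEdges plan)).take t).map (fun x => x.1) ++ [hb.1]))
          :: tb.map (fun x => [x.1]), []) := by
    rw [pvRuns_shift, hc1]
  -- A's cells
  have hAcells : (pvRuns (pvRotl k (plan.zip (pvEdges plan))) [] []).1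
      = (pvRuns ((plan.zip (pvEdges plan)).drop k) [] []).1
        ++ ((pvRuns ((plan.zip (pvEdges plan)).drop k) [] []).2
            ++ (((plan.zip (pvEdges plan)).take t).map (fun x => x.1) ++ [hb.1]))
          :: tb.map (fun x => [x.1]) := by
    show (pvRuns ((plan.zip (pvEdges plan)).drop k ++ (plan.zip (pvEdges plan)).take k) [] []).1 = _
    rw [pvRuns_append, pvRuns_acc, hshift]
  -- B's linear runs
  have hlin : pvRuns (plan.zip (pvEdges plan)) [] []
      = ((((plan.zip (pvEdges plan)).take t).map (fun x => x.1) ++ [hb.1])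
          :: (tb.map (fun x => [x.1]) ++ (pvRuns ((plan.zip (pvEdges plan)).drop k) [] []).1),
         (pvRuns ((plan.zip (pvEdges plan)).drop k) [] []).2) := by
    conv_lhs => rw [← List.take_append_drop k (plan.zip (pvEdges plan))]
    rw [pvRuns_append, hc1, pvRuns_acc]
    simp
  have hz := pvRuns_z_snoc plan hne
  rw [helast] at hz
  simp only [if_true] at hz
  have hpr := hz.symm.trans hlin
  have hC : (pvRuns ((plan.zip (pvEdges plan)).take (plan.length - 1)) [] []).1
      = (((plan.zip (pvEdges plan)).take t).map (fun x => x.1) ++ [hb.1])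
        :: (tb.map (fun x => [x.1]) ++ (pvRuns ((plan.zip (pvEdges plan)).drop k) [] []).1) :=
    (Prod.ext_iff.mp hpr).1
  have hO : (pvRuns ((plan.zip (pvEdges plan)).take (plan.length - 1)) [] []).2 ++ [plan.getLast hne]
      = (pvRuns ((plan.zip (pvEdges plan)).drop k) [] []).2 :=
    (Prod.ext_iff.mp hpr).2
  have ho2ne : (pvRuns ((plan.zip (pvEdges plan)).drop k) [] []).2 ≠ [] := by
    rw [← hO]
    simp
  -- assemble B
  rw [hA, hAcells, pvAlt_eq plan hne, hC, hO, helast]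
  unfold pvWrapCells
  rw [if_pos ⟨by simp, rfl⟩]
  simp only [List.cons_append, List.drop_succ_cons, List.drop_zero, List.dropLast_concat,
    List.headD_cons]
  have hgl : ((((plan.zip (pvEdges plan)).take t).map (fun x => x.1) ++ [hb.1])
      :: ((tb.map (fun x => [x.1]) ++ (pvRuns ((plan.zip (pvEdges plan)).drop k) [] []).1)
        ++ [(pvRuns ((plan.zip (pvEdges plan)).drop k) [] []).2])).getLastD []
      = (pvRuns ((plan.zip (pvEdges plan)).drop k) [] []).2 := by
    rw [List.getLastD_eq_getLast?]
    rw [show (((plan.zip (pvEdges plan)).take t).map (fun x => x.1) ++ [hb.1])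
        :: ((tb.map (fun x => [x.1]) ++ (pvRuns ((plan.zip (pvEdges plan)).drop k) [] []).1)
          ++ [(pvRuns ((plan.zip (pvEdges plan)).drop k) [] []).2])
      = ((((plan.zip (pvEdges plan)).take t).map (fun x => x.1) ++ [hb.1])
          :: (tb.map (fun x => [x.1]) ++ (pvRuns ((plan.zip (pvEdges plan)).drop k) [] []).1))
        ++ [(pvRuns ((plan.zip (pvEdges plan)).drop k) [] []).2] from by simp]
    rw [List.getLast?_concat]
    rfl
  rw [hgl]
  have hu : ∀ r ∈ tb.map (fun x : (Int × Int) × Bool => [x.1]), r.length = 1 := by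
    intro r hr
    obtain ⟨x, _, rfl⟩ := List.mem_map.mp hr
    rfl
  -- the closed runs of the suffix: empty, or led by a ≥2-point run
  have hkz : k < (plan.zip (pvEdges plan)).length := by omega
  have hket : (pvEdges plan)[k]'(by omega) = true := by
    have h := hPk.1
    rwa [List.getD_eq_getElem _ _ (show k < (pvEdges plan).length by omega)] at h
  have hz2cons : (plan.zip (pvEdges plan)).drop k
      = ((plan[k]'(by omega), true)) :: (plan.zip (pvEdges plan)).drop (k + 1) := by
    rw [List.drop_eq_getElem_cons hkz]
    congr 1
    simp [List.getElem_zip, hket]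
  have hft := pvRuns_firstTrue (plan[k]'(by omega)) ((plan.zip (pvEdges plan)).drop (k + 1))
  rw [← hz2cons] at hft
  rcases hft with hem | ⟨ch, ct, hc2, hch⟩
  · -- no closed run in the suffix: the wrap cell leads
    rw [hem]
    simp only [List.append_nil]
    have hv : 1 < ((pvRuns ((plan.zip (pvEdges plan)).drop k) [] []).2
        ++ (((plan.zip (pvEdges plan)).take t).map (fun x => x.1) ++ [hb.1])).length := by
      have h1 : 0 < ((pvRuns ((plan.zip (pvEdges plan)).drop k) [] []).2).length :=
        List.length_pos_iff.mpr ho2ne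
      simp
      omega
    rw [pvCellsOut_app _ _ [] hu hv]
    simp
  · rw [hc2]
    have hsh : (tb.map (fun x : (Int × Int) × Bool => [x.1]) ++ (ch :: ct))
        ++ [(pvRuns ((plan.zip (pvEdges plan)).drop k) [] []).2
            ++ (((plan.zip (pvEdges plan)).take t).map (fun x => x.1) ++ [hb.1])]
        = tb.map (fun x : (Int × Int) × Bool => [x.1])
          ++ (ch :: (ct ++ [(pvRuns ((plan.zip (pvEdges plan)).drop k) [] []).2
            ++ (((plan.zip (pvEdges plan)).take t).map (fun x => x.1) ++ [hb.1])])) := by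
      simp
    rw [hsh, pvCellsOut_app _ _ _ hu hch]
    simp

-- ===== VERDICT (by name: the statements are the Claim_ definitions above) =====
theorem sparse_curve_spec : Claim_equal_sparse_curve := by
  intro plan _ hpre
  obtain ⟨hne, hfalse⟩ := hpre
  unfold Spec_sparse_curve
  by_cases htrue : true ∈ pvEdges plan
  · cases helast : (pvEdges plan).getD (plan.length - 1) false with
    | false => exact pvCaseFalseLast plan hne htrue helast
    | true => exact pvCaseTrueLast plan hne htrue hfalse helast
  · exact pvCaseNoTrue plan hne htrue
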